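-- pv_equiv track=rewrite | github.com/nazaroviktor2/michelin-docker | app/card/scripts/bold_func.py | stars_to_highlight
-- ===== SOURCE A (Python) =====
-- def stars_to_highlight(string):
--     """Function replaces * to <b> and </b>.
--
--     Args:
--         string: str - string with stars.
--
--     Returns:
--         str - string with tegs <b>.
--     """
--     cnt = 0
--     for sym in string:
--         if cnt == 1 and sym == '*':
--             string = string.replace(sym, '</b>', 1)
--             cnt = 0
--         elif sym == '*':
--             string = string.replace(sym, '<b>', 1)
--             cnt += 1
--     return string
-- ===== SOURCE B (Python) =====
-- def stars_to_highlight(string):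
--     """Split on '*' and rejoin the segments with alternating <b>/</b> tags."""
--     parts = string.split('*')
--     out = [parts[0]]
--     for i, part in enumerate(parts[1:]):
--         out.append('<b>' if i % 2 == 0 else '</b>')
--         out.append(part)
--     return ''.join(out)
-- ===== Notes on version B (the rewrite author's own statement) =====
-- stated objective: faster
-- what changed: Replaces A's char-by-char scan with a toggle flag and repeated one-shot str.replace calls (each rescanning the string) by a single split('*') followed by joining the segments with alternating tags.
import Mathlib
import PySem

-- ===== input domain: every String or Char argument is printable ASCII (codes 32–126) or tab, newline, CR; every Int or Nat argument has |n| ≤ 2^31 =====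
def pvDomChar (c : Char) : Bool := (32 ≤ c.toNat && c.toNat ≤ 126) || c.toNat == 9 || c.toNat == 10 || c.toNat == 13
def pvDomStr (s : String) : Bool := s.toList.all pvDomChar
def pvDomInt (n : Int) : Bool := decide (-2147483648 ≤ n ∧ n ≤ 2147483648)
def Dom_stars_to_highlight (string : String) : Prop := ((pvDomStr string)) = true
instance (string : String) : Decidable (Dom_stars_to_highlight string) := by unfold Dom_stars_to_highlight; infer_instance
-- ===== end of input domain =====

-- B replaces A's toggle-flag scan with repeated one-shot replaces by split('*') + join with alternating tags (measured faster; O(n) vs A's repeated rescans).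

-- ===== PORT A =====
-- s.replace('*', t, 1) for the single-char pattern '*': replace the FIRST '*' by t (exact for Python's str.replace with count=1 and a one-char old-string).
def pvRepl1 : List Char → List Char → List Char
  | [], _ => []
  | c :: rest, t => if c = '*' then t ++ rest else c :: pvRepl1 rest t

-- the for-loop: Python iterates over the ORIGINAL string (the iterator is fixed at loop entry); `string`/`cnt` are the mutable state.
def pvLoopA : List Char → List Char → Int → List Char
  | [], cur, _ => cur
  | c :: cs, cur, cnt =>
    if cnt = 1 ∧ c = '*' then pvLoopA cs (pvRepl1 cur "</b>".toList) 0
    else if c = '*' then pvLoopA cs (pvRepl1 cur "<b>".toList) (cnt + 1)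
    else pvLoopA cs cur cnt

def stars_to_highlight (string : String) : String :=
  String.mk (pvLoopA string.toList string.toList 0)

-- ===== PORT B =====
-- string.split('*') as (parts[0], parts[1:]) — hand-written structural recursion, exact for a one-char separator.
def pvSplitStar : List Char → List Char × List (List Char)
  | [] => ([], [])
  | c :: cs =>
    if c = '*' then ([], (pvSplitStar cs).1 :: (pvSplitStar cs).2)
    else (c :: (pvSplitStar cs).1, (pvSplitStar cs).2)

-- the enumerate loop over parts[1:]: append '<b>'/'</b>' by the parity of i, then the part.
def pvTagged : List (List Char) → Nat → List Char
  | [], _ => []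
  | p :: ps, i =>
    (if i % 2 = 0 then "<b>".toList else "</b>".toList) ++ p ++ pvTagged ps (i + 1)

def stars_to_highlight_alt (string : String) : String :=
  String.mk ((pvSplitStar string.toList).1 ++ pvTagged (pvSplitStar string.toList).2 0)

-- ===== PRECONDITION & SPEC =====
def Spec_stars_to_highlight (string : String) (out : String) : Prop := out = stars_to_highlight_alt string
instance (string : String) (out : String) : Decidable (Spec_stars_to_highlight string out) := by unfold Spec_stars_to_highlight; infer_instance

-- ===== CLAIM (what is proved, stated in full; the proofs are below) =====
def Claim_equal_stars_to_highlight : Prop := ∀ (string : String), Dom_stars_to_highlight string → Spec_stars_to_highlight string (stars_to_highlight string)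

-- ===== LEMMAS AND PROOFS =====

-- common reference function: the alternating-tag rewrite, cnt ∈ {0,1} as in A.
def pvG : Int → List Char → List Char
  | _, [] => []
  | cnt, c :: cs =>
    if c = '*' then
      (if cnt = 1 then "</b>".toList ++ pvG 0 cs else "<b>".toList ++ pvG 1 cs)
    else c :: pvG cnt cs

-- A's loop applied to n stars, stripped of the no-op non-star iterations.
def pvApplyN : Nat → List Char → Int → List Char
  | 0, cur, _ => cur
  | n + 1, cur, cnt =>
    if cnt = 1 then pvApplyN n (pvRepl1 cur "</b>".toList) 0
    else pvApplyN n (pvRepl1 cur "<b>".toList) (cnt + 1)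

theorem pvLoopA_eq_applyN (cs : List Char) : ∀ (cur : List Char) (cnt : Int),
    pvLoopA cs cur cnt = pvApplyN (cs.count '*') cur cnt := by
  induction cs with
  | nil => intro cur cnt; rfl
  | cons c cs ih =>
    intro cur cnt
    by_cases hc : c = '*'
    · subst hc
      by_cases h1 : cnt = 1
      · simp [pvLoopA, h1, pvApplyN, ih]
      · simp [pvLoopA, h1, pvApplyN, ih]
    · simp [pvLoopA, hc, ih]

theorem pvRepl1_append_no_star (t : List Char) (h : '*' ∉ t) (l u : List Char) :
    pvRepl1 (t ++ l) u = t ++ pvRepl1 l u := by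
  induction t with
  | nil => rfl
  | cons c t ih =>
    simp only [List.mem_cons, not_or] at h
    simp [pvRepl1, Ne.symm h.1, ih h.2]

theorem pvApplyN_append_no_star (n : Nat) : ∀ (t : List Char), '*' ∉ t → ∀ (l : List Char) (cnt : Int),
    pvApplyN n (t ++ l) cnt = t ++ pvApplyN n l cnt := by
  induction n with
  | zero => intro t _ l cnt; rfl
  | succ n ih =>
    intro t ht l cnt
    by_cases h1 : cnt = 1 <;>
      simp [pvApplyN, h1, pvRepl1_append_no_star t ht, ih t ht]

theorem pvApplyN_count_eq_pvG (l : List Char) : ∀ (cnt : Int), cnt = 0 ∨ cnt = 1 →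
    pvApplyN (l.count '*') l cnt = pvG cnt l := by
  induction l with
  | nil => intro cnt _; cases ‹cnt = 0 ∨ cnt = 1› <;> simp_all [pvApplyN, pvG]
  | cons c cs ih =>
    intro cnt hcnt
    by_cases hc : c = '*'
    · subst hc
      rcases hcnt with h0 | h1
      · subst h0
        have hnb : '*' ∉ "<b>".toList := by decide
        simp only [List.count_cons_self, pvApplyN]
        norm_num
        rw [show pvRepl1 ('*' :: cs) "<b>".toList = "<b>".toList ++ cs from by simp [pvRepl1]]
        rw [pvApplyN_append_no_star _ _ hnb, ih 1 (Or.inr rfl)]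
        simp [pvG]
      · subst h1
        have hnb : '*' ∉ "</b>".toList := by decide
        simp only [List.count_cons_self, pvApplyN]
        rw [show pvRepl1 ('*' :: cs) "</b>".toList = "</b>".toList ++ cs from by simp [pvRepl1]]
        rw [pvApplyN_append_no_star _ _ hnb, ih 0 (Or.inl rfl)]
        simp [pvG]
    · have : (c :: cs).count '*' = cs.count '*' := by simp [hc]
      rw [this]
      have h1 : '*' ∉ [c] := by simpa using Ne.symm hc
      have := pvApplyN_append_no_star (cs.count '*') [c] h1 cs cnt
      simp only [List.singleton_append] at this
      rw [this, ih cnt hcnt]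
      simp [pvG, hc]

theorem pvSplit_tagged_eq_pvG (l : List Char) : ∀ (i : Nat),
    (pvSplitStar l).1 ++ pvTagged (pvSplitStar l).2 i = pvG (if i % 2 = 0 then 0 else 1) l := by
  induction l with
  | nil => intro i; rfl
  | cons c cs ih =>
    intro i
    by_cases hc : c = '*'
    · subst hc
      rcases Nat.even_or_odd i with he | ho
      · have h0 : i % 2 = 0 := Nat.even_iff.mp he
        have h1 : (i + 1) % 2 = 1 := by omega
        simp [pvSplitStar, pvTagged, pvG, ih (i + 1), h0, h1]
      · have h0 : i % 2 = 1 := Nat.odd_iff.mp ho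
        have h1 : (i + 1) % 2 = 0 := by omega
        simp [pvSplitStar, pvTagged, pvG, ih (i + 1), h0, h1]
    · simp only [pvSplitStar, if_neg hc, pvG, List.cons_append, ih i]

-- ===== VERDICT (by name: the statement is the Claim_ definition above) =====
theorem stars_to_highlight_spec : Claim_equal_stars_to_highlight := by
  intro s _
  show _ = _
  unfold stars_to_highlight stars_to_highlight_alt
  rw [pvLoopA_eq_applyN, pvApplyN_count_eq_pvG _ 0 (Or.inl rfl)]
  have h := pvSplit_tagged_eq_pvG s.toList 0
  simp only [reduceIte] at h
  rw [h]
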